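-- pv_equiv track=rewrite | github.com/Alex-Dolia/video_processing | src_tracking_merge/NEW_inference_V2.py | find_maximal_sets_new
-- ===== SOURCE A (Python) =====
-- from collections import OrderedDict
--
-- def find_maximal_sets_new(frames):
--     """
--     We find what faces are appeared in the same frame.
--     For example, frames = [{1} {1, 2} {1, 2, 3} {1, 3} {3} {3, 4} {4} {5} {5, 6} {6}],
--     where {1} and {1, 2, 3} means we have only a face with id 1 and
--     faces with ids 1, 2 and 3 in the corresponding frames.
--
--     Then we get: maximal_sets = [{1, 2, 3}, {3, 4}, {5, 6}].
--     """
--     # Sort frames by length in descending order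
--     frames = [set(i) for i in OrderedDict.fromkeys(frozenset(item) for item in frames)]
--     sorted_frames = sorted(frames, key=len, reverse=True)
--
--     maximal_sets = []
--     for i, frame in enumerate(sorted_frames):
--         is_maximal = True
--         for larger_frame in maximal_sets:
--             if frame < larger_frame:
--                 is_maximal = False
--                 break
--         if is_maximal:
--             maximal_sets.append(frame)
--
--     maximal_sets = [set(i) for i in OrderedDict.fromkeys(frozenset(item) for item in maximal_sets)]
--     return maximal_sets
-- ===== SOURCE B (Python) =====
-- def find_maximal_sets_new(frames):
--     # Dedup frames (as frozensets, first occurrence order), keep every set with no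
--     # strict superset anywhere in the collection, then stable-sort by size descending.
--     uniq = []
--     for f in frames:
--         s = frozenset(f)
--         if s not in uniq:
--             uniq.append(s)
--     maximal = [set(s) for s in uniq
--                if not any(len(s) < len(t) and s <= t for t in uniq)]
--     maximal.sort(key=len, reverse=True)
--     return maximal
-- ===== Notes on version B (the rewrite author's own statement) =====
-- stated objective: alternative
-- what changed: B replaces A's sort-then-incremental-accumulation (each frame tested for strict-subset against the maximal sets accepted so far, then a final re-deduplication pass) by a pure filter of the deduplicated collection against the whole collection (no strict superset exists anywhere), sorting by size descending only afterwards and needing no final dedup.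
import Mathlib
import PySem

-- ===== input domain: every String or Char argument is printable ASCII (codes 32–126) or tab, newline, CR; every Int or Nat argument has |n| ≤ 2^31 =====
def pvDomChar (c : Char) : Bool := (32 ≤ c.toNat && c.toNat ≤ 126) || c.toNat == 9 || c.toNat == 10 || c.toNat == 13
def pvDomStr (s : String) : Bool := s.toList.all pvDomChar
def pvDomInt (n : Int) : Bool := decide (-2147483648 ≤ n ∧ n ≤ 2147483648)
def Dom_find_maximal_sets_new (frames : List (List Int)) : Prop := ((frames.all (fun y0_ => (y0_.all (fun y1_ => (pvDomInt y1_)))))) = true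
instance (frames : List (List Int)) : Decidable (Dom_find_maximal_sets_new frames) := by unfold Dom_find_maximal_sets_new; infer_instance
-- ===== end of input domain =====

-- B returns A's exact output but tests maximality by a pure filter of the deduplicated
-- collection against the whole collection before sorting, instead of A's sort-first
-- incremental accumulation against already-accepted maximal sets plus a final re-dedup pass.

-- ===== PORT A =====
-- OrderedDict.fromkeys over frozensets: keep first occurrence, keyed by set equality
def pyFrozenDedup (xs : List (PySem.Set Int)) : List (PySem.Set Int) :=
  xs.foldl (fun acc s => if acc.any (fun t => PySem.Set.equal s t) then acc else acc ++ [s]) []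

-- Python's 'frame < larger_frame' on sets: subset and not equal
def pyStrictSubset (a b : PySem.Set Int) : Bool :=
  PySem.Set.issubset a b && !(PySem.Set.equal a b)

def find_maximal_sets_new (frames : List (List Int)) : List (List Int) :=
  let fs := pyFrozenDedup (frames.map (fun f => PySem.Set.ofList f))
  let sorted_frames := PySem.List.sorted fs (fun s => PySem.Set.len s) true
  let maximal := sorted_frames.foldl
    (fun acc frame =>
      if acc.any (fun larger => pyStrictSubset frame larger) then acc else acc ++ [frame]) []
  pyFrozenDedup maximal

-- ===== PORT B =====
-- 's not in uniq' on a list of frozensets: linear scan with set equality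
def altDedup (frames : List (List Int)) : List (PySem.Set Int) :=
  frames.foldl
    (fun uniq f =>
      if uniq.any (fun t => PySem.Set.equal (PySem.Set.ofList f) t) then uniq
      else uniq ++ [PySem.Set.ofList f]) []

-- 'any(len(s) < len(t) and s <= t for t in uniq)': a strict superset exists somewhere
def altHasSuperset (uniq : List (PySem.Set Int)) (s : PySem.Set Int) : Bool :=
  uniq.any (fun t => decide (PySem.Set.len s < PySem.Set.len t) && PySem.Set.issubset s t)

def find_maximal_sets_new_alt (frames : List (List Int)) : List (List Int) :=
  let uniq := altDedup frames
  let maximal := uniq.filter (fun s => !(altHasSuperset uniq s))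
  PySem.List.sorted maximal (fun s => PySem.Set.len s) true

-- ===== PRECONDITION & SPEC =====
def Spec_find_maximal_sets_new (frames : List (List Int)) (out : List (List Int)) : Prop := out = find_maximal_sets_new_alt frames
instance (frames : List (List Int)) (out : List (List Int)) : Decidable (Spec_find_maximal_sets_new frames out) := by unfold Spec_find_maximal_sets_new; infer_instance

-- ===== CLAIM (what is proved, stated in full; the proofs are below) =====
def Claim_equal_find_maximal_sets_new : Prop := ∀ (frames : List (List Int)), Dom_find_maximal_sets_new frames → Spec_find_maximal_sets_new frames (find_maximal_sets_new frames)

-- ===== LEMMAS AND PROOFS =====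

theorem pvEqualSymm (a b : PySem.Set Int) : PySem.Set.equal a b = PySem.Set.equal b a := by
  simp [PySem.Set.equal, Bool.and_comm]

theorem pvDedupInv (xs : List (List Int)) (acc : List (PySem.Set Int))
    (hN : ∀ s ∈ acc, s.Nodup)
    (hP : acc.Pairwise (fun a b => PySem.Set.equal b a = false)) :
    (∀ s ∈ xs.foldl
        (fun acc f => if acc.any (fun t => PySem.Set.equal (PySem.Set.ofList f) t) then acc
          else acc ++ [PySem.Set.ofList f]) acc, s.Nodup) ∧
    (xs.foldl
        (fun acc f => if acc.any (fun t => PySem.Set.equal (PySem.Set.ofList f) t) then acc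
          else acc ++ [PySem.Set.ofList f]) acc).Pairwise
      (fun a b => PySem.Set.equal b a = false) := by
  induction xs generalizing acc with
  | nil => exact ⟨hN, hP⟩
  | cons f xs ih =>
    simp only [List.foldl_cons]
    by_cases h : List.any acc (fun t => PySem.Set.equal (PySem.Set.ofList f) t) = true
    · simp only [h, if_true]; exact ih acc hN hP
    · simp only [h, Bool.false_eq_true, if_false]
      apply ih
      · intro s hs
        rcases List.mem_append.mp hs with h1 | h1
        · exact hN s h1
        · simp at h1; subst h1; exact PySem.Set.nodup_ofList f
      · rw [List.pairwise_append]
        refine ⟨hP, List.pairwise_singleton _ _, ?_⟩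
        intro a ha b hb; simp at hb; subst hb
        have h' := List.any_eq_false.mp (Bool.of_not_eq_true h)
        have := h' a ha
        revert this
        cases hb2 : (PySem.Set.ofList f).equal a <;> simp

theorem pvDedupNoop (l acc : List (PySem.Set Int))
    (h1 : ∀ s ∈ l, ∀ t ∈ acc, PySem.Set.equal s t = false)
    (h2 : l.Pairwise (fun a b => PySem.Set.equal b a = false)) :
    l.foldl (fun acc s => if acc.any (fun t => PySem.Set.equal s t) then acc else acc ++ [s]) acc
      = acc ++ l := by
  induction l generalizing acc with
  | nil => simp
  | cons s l ih =>
    simp only [List.foldl_cons]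
    have hany : acc.any (fun t => PySem.Set.equal s t) = false := by
      simp only [List.any_eq_false]
      intro t ht
      simp [h1 s (by simp) t ht]
    simp only [hany, Bool.false_eq_true, if_false]
    rw [ih (acc ++ [s])]
    · simp
    · intro s' hs' t ht
      rcases List.mem_append.mp ht with h | h
      · exact h1 s' (by simp [hs']) t h
      · simp at h; subst h
        exact (List.pairwise_cons.mp h2).1 s' hs'
    · exact (List.pairwise_cons.mp h2).2

theorem pvStrictIff (a b : PySem.Set Int) (ha : a.Nodup) (hb : b.Nodup) :
    pyStrictSubset a b = true ↔ (∀ x ∈ a, x ∈ b) ∧ a.length < b.length := by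
  simp only [pyStrictSubset, Bool.and_eq_true, Bool.not_eq_true',
    PySem.Set.issubset_iff]
  constructor
  · rintro ⟨hsub, hne⟩
    refine ⟨hsub, ?_⟩
    have hsp := (List.Nodup.subperm ha hsub).length_le
    rcases lt_or_eq_of_le hsp with h | h
    · exact h
    · exfalso
      have hperm := List.Subperm.perm_of_length_le (List.Nodup.subperm ha hsub) (le_of_eq h.symm)
      have : PySem.Set.equal a b = true := (PySem.Set.equal_iff a b).mpr (fun x => hperm.mem_iff)
      simp [this] at hne
  · rintro ⟨hsub, hlt⟩
    refine ⟨hsub, ?_⟩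
    rw [Bool.eq_false_iff]
    intro heq
    have hiff := (PySem.Set.equal_iff a b).mp heq
    have hsub2 : b ⊆ a := fun x hx => (hiff x).mpr hx
    have := (List.Nodup.subperm hb hsub2).length_le
    omega

theorem pvAltStrictIff (a b : PySem.Set Int) :
    (decide (PySem.Set.len a < PySem.Set.len b) && PySem.Set.issubset a b) = true
      ↔ (∀ x ∈ a, x ∈ b) ∧ a.length < b.length := by
  simp only [PySem.Set.len, Bool.and_eq_true, decide_eq_true_eq, PySem.Set.issubset_iff]
  constructor
  · rintro ⟨h1, h2⟩; exact ⟨h2, by exact_mod_cast h1⟩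
  · rintro ⟨h1, h2⟩; exact ⟨by exact_mod_cast h2, h1⟩

theorem pvInsertByAll {α : Type} (bef : α → α → Bool) (x : α) (l : List α)
    (h : ∀ z ∈ l, bef x z = true) :
    PySem.List.insertBy bef x l = x :: l := by
  cases l with
  | nil => rfl
  | cons z l => simp [PySem.List.insertBy, h z (by simp)]

theorem pvInsertByPairwise {α : Type} (key : α → Int) (x : α) (l : List α)
    (h : l.Pairwise (fun a b => key b ≤ key a)) :
    (PySem.List.insertBy (fun a b => decide (key b < key a)) x l).Pairwise
      (fun a b => key b ≤ key a) := by
  induction l with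
  | nil => simp [PySem.List.insertBy]
  | cons y ys ih =>
    rw [List.pairwise_cons] at h
    by_cases hxy : key y < key x
    · simp only [PySem.List.insertBy, hxy, decide_true, if_true]
      rw [List.pairwise_cons]
      constructor
      · intro z hz
        rcases List.mem_cons.mp hz with rfl | hz
        · exact le_of_lt hxy
        · exact le_trans (h.1 z hz) (le_of_lt hxy)
      · exact List.pairwise_cons.mpr h
    · simp only [PySem.List.insertBy, hxy, decide_false, Bool.false_eq_true, if_false]
      rw [List.pairwise_cons]
      constructor
      · intro z hz
        rcases (PySem.List.mem_insertBy _ x z ys).mp hz with rfl | hz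
        · exact not_lt.mp hxy
        · exact h.1 z hz
      · exact ih h.2

theorem pvFilterInsertBy {α : Type} (key : α → Int) (p : α → Bool) (x : α) (l : List α)
    (h : l.Pairwise (fun a b => key b ≤ key a)) :
    (PySem.List.insertBy (fun a b => decide (key b < key a)) x l).filter p
      = if p x then PySem.List.insertBy (fun a b => decide (key b < key a)) x (l.filter p)
        else l.filter p := by
  induction l with
  | nil =>
    cases hx : p x <;> simp [PySem.List.insertBy, List.filter, hx]
  | cons y ys ih =>
    rw [List.pairwise_cons] at h
    by_cases hxy : key y < key x
    · simp only [PySem.List.insertBy, hxy, decide_true, if_true]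
      cases hx : p x with
      | true =>
        have hall : ∀ z ∈ List.filter p (y :: ys),
            (fun a b => decide (key b < key a)) x z = true := by
          intro z hz
          have hz' := List.mem_filter.mp hz
          simp only [decide_eq_true_eq]
          rcases List.mem_cons.mp hz'.1 with rfl | h1
          · exact hxy
          · exact lt_of_le_of_lt (h.1 z h1) hxy
        rw [pvInsertByAll _ x _ hall]
        simp [List.filter_cons, hx]
      | false =>
        simp [List.filter_cons, hx]
    · simp only [PySem.List.insertBy, hxy, decide_false, Bool.false_eq_true, if_false]
      cases hx : p x with
      | true =>
        cases hy : p y with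
        | true =>
          simp only [List.filter_cons, hy, if_true]
          have : PySem.List.insertBy (fun a b => decide (key b < key a)) x (y :: List.filter p ys)
              = y :: PySem.List.insertBy (fun a b => decide (key b < key a)) x (List.filter p ys) := by
            simp [PySem.List.insertBy, hxy]
          rw [this, ih h.2]
          simp [hx]
        | false =>
          simp only [List.filter_cons, hy]
          rw [ih h.2]
          simp [hx]
      | false =>
        cases hy : p y with
        | true =>
          simp only [List.filter_cons, hy]
          rw [ih h.2]
          simp [hx]
        | false =>
          simp only [List.filter_cons, hy]
          rw [ih h.2]
          simp [hx]

theorem pvFilterFoldIns {α : Type} (key : α → Int) (p : α → Bool) (xs : List α) (acc : List α)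
    (h : acc.Pairwise (fun a b => key b ≤ key a)) :
    (xs.foldl (fun acc x => PySem.List.insertBy (fun a b => decide (key b < key a)) x acc) acc).filter p
      = (xs.filter p).foldl (fun acc x => PySem.List.insertBy (fun a b => decide (key b < key a)) x acc) (acc.filter p) := by
  induction xs generalizing acc with
  | nil => simp
  | cons x xs ih =>
    simp only [List.foldl_cons, List.filter_cons]
    rw [ih _ (pvInsertByPairwise key x acc h), pvFilterInsertBy key p x acc h]
    cases hx : p x <;> simp

theorem pvFilterSorted {α : Type} (key : α → Int) (p : α → Bool) (xs : List α) :
    (PySem.List.sorted xs key true).filter p = PySem.List.sorted (xs.filter p) key true := by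
  rw [PySem.List.sorted_rev_eq_foldl_insertBy, PySem.List.sorted_rev_eq_foldl_insertBy]
  simpa using pvFilterFoldIns key p xs [] (by simp)

theorem pvFoldMaximalAux (r : PySem.Set Int → PySem.Set Int → Bool) (v : List (PySem.Set Int))
    (hsorted : v.Pairwise (fun a b => b.length ≤ a.length))
    (hlt : ∀ s ∈ v, ∀ t ∈ v, r s t = true → s.length < t.length)
    (htrans : ∀ a ∈ v, ∀ b ∈ v, ∀ c ∈ v, r a b = true → r b c = true → r a c = true)
    (rest pre : List (PySem.Set Int)) (hv : pre ++ rest = v) :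
    rest.foldl (fun acc s => if acc.any (fun t => r s t) then acc else acc ++ [s])
        (pre.filter (fun s => !(v.any (fun t => r s t))))
      = (pre ++ rest).filter (fun s => !(v.any (fun t => r s t))) := by
  induction rest generalizing pre with
  | nil => simp
  | cons s rest ih =>
    have hs_v : s ∈ v := by rw [← hv]; simp
    have hany : (List.filter (fun s => !(v.any (fun t => r s t))) pre).any (fun t => r s t)
        = v.any (fun t => r s t) := by
      rcases hV : v.any (fun t => r s t) with _ | _
      · -- no strict superset anywhere: the accumulator surely has none
        rw [List.any_eq_false] at hV ⊢
        intro t ht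
        exact hV t (by rw [← hv]; exact List.mem_append_left _ (List.mem_filter.mp ht).1)
      · -- some strict superset exists: a maximal-length one is in the accumulator
        rw [List.any_eq_true] at hV
        obtain ⟨t0, ht0v, ht0⟩ := hV
        have hw : t0 ∈ v.filter (fun t => r s t) := List.mem_filter.mpr ⟨ht0v, ht0⟩
        have hne : v.filter (fun t => r s t) ≠ [] := List.ne_nil_of_mem hw
        obtain ⟨m, hm⟩ : ∃ m, m ∈ List.argmax List.length (v.filter (fun t => r s t)) := by
          rcases ha : List.argmax List.length (v.filter (fun t => r s t)) with _ | m
          · exact absurd (List.argmax_eq_none.mp ha) hne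
          · exact ⟨m, by simp⟩
        have hmw : m ∈ v.filter (fun t => r s t) := List.argmax_mem hm
        have hmv : m ∈ v := (List.mem_filter.mp hmw).1
        have hrm : r s m = true := (List.mem_filter.mp hmw).2
        have hPm : (!(v.any (fun t => r m t))) = true := by
          simp only [Bool.not_eq_true', List.any_eq_false]
          intro t' ht'
          rcases hrt : r m t' with _ | _
          · simp
          · exfalso
            have hst' : r s t' = true := htrans s hs_v m hmv t' ht' hrm hrt
            have : t' ∈ v.filter (fun t => r s t) := List.mem_filter.mpr ⟨ht', hst'⟩
            have hle := List.le_of_mem_argmax this hm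
            have := hlt m hmv t' ht' hrt
            omega
        have hmpre : m ∈ pre := by
          have : m ∈ pre ++ s :: rest := by rw [hv]; exact hmv
          rcases List.mem_append.mp this with h | h
          · exact h
          · exfalso
            have hlen := hlt s hs_v m hmv hrm
            rcases List.mem_cons.mp h with rfl | h
            · omega
            · -- m comes after s in the sorted list, so its length is ≤
              have hp : (s :: rest).Pairwise (fun a b => b.length ≤ a.length) := by
                have := hsorted
                rw [← hv, List.pairwise_append] at this
                exact this.2.1
              have := (List.pairwise_cons.mp hp).1 m h
              omega
        rw [List.any_eq_true]
        exact ⟨m, List.mem_filter.mpr ⟨hmpre, hPm⟩, hrm⟩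
    simp only [List.foldl_cons, hany]
    rcases hV : v.any (fun t => r s t) with _ | _
    · -- s is kept
      rw [hV] at hany
      simp only [Bool.false_eq_true, if_false]
      have : List.filter (fun s => !(v.any (fun t => r s t))) pre ++ [s]
          = List.filter (fun s => !(v.any (fun t => r s t))) (pre ++ [s]) := by
        simp [List.filter_append, hV]
      rw [this, ih (pre ++ [s]) (by simpa using hv)]
      simp
    · -- s is dropped
      rw [hV] at hany
      simp only [if_true]
      have : List.filter (fun s => !(v.any (fun t => r s t))) pre
          = List.filter (fun s => !(v.any (fun t => r s t))) (pre ++ [s]) := by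
        simp [List.filter_append, hV]
      rw [this, ih (pre ++ [s]) (by simpa using hv)]
      simp

theorem pvFoldMaximal (r : PySem.Set Int → PySem.Set Int → Bool) (v : List (PySem.Set Int))
    (hsorted : v.Pairwise (fun a b => b.length ≤ a.length))
    (hlt : ∀ s ∈ v, ∀ t ∈ v, r s t = true → s.length < t.length)
    (htrans : ∀ a ∈ v, ∀ b ∈ v, ∀ c ∈ v, r a b = true → r b c = true → r a c = true) :
    v.foldl (fun acc s => if acc.any (fun t => r s t) then acc else acc ++ [s]) []
      = v.filter (fun s => !(v.any (fun t => r s t))) := by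
  simpa using pvFoldMaximalAux r v hsorted hlt htrans v [] rfl

-- the two programs agree everywhere
theorem pvMain (frames : List (List Int)) :
    find_maximal_sets_new frames = find_maximal_sets_new_alt frames := by
  have hboolext : ∀ (x y : Bool), (x = true ↔ y = true) → x = y := by decide
  -- the two dedup passes compute the same list
  have hdedup : pyFrozenDedup (frames.map (fun f => PySem.Set.ofList f)) = altDedup frames := by
    simp only [pyFrozenDedup, altDedup, List.foldl_map]
  set u := altDedup frames with hu
  obtain ⟨huN, huP⟩ := pvDedupInv frames [] (by simp) (by simp)
  rw [show (frames.foldl (fun acc f =>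
      if acc.any (fun t => PySem.Set.equal (PySem.Set.ofList f) t) then acc
      else acc ++ [PySem.Set.ofList f]) []) = u from rfl] at huN huP
  set v := PySem.List.sorted u (fun s => PySem.Set.len s) true with hv
  have hperm : v.Perm u := PySem.List.sorted_perm u _ true
  have hvN : ∀ s ∈ v, s.Nodup := fun s hs => huN s (hperm.mem_iff.mp hs)
  have hsymm : ∀ {x y : PySem.Set Int},
      (fun a b => PySem.Set.equal b a = false) x y → (fun a b => PySem.Set.equal b a = false) y x := by
    intro x y h; simpa [pvEqualSymm] using h
  have hvP : v.Pairwise (fun a b => PySem.Set.equal b a = false) :=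
    (List.Perm.pairwise_iff hsymm hperm).mpr huP
  have hsorted : v.Pairwise (fun a b => b.length ≤ a.length) := by
    have := PySem.List.sorted_pairwise_rev u (fun s => PySem.Set.len s)
    rw [← hv] at this
    exact this.imp (by intro a b h; simpa [PySem.Set.len] using h)
  have hlt : ∀ s ∈ v, ∀ t ∈ v, pyStrictSubset s t = true → s.length < t.length := by
    intro s hs t ht h
    exact ((pvStrictIff s t (hvN s hs) (hvN t ht)).mp h).2
  have htrans : ∀ a ∈ v, ∀ b ∈ v, ∀ c ∈ v,
      pyStrictSubset a b = true → pyStrictSubset b c = true → pyStrictSubset a c = true := by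
    intro a ha b hb c hc h1 h2
    have h1' := (pvStrictIff a b (hvN a ha) (hvN b hb)).mp h1
    have h2' := (pvStrictIff b c (hvN b hb) (hvN c hc)).mp h2
    exact (pvStrictIff a c (hvN a ha) (hvN c hc)).mpr
      ⟨fun x hx => h2'.1 x (h1'.1 x hx), lt_trans h1'.2 h2'.2⟩
  -- predicates agree on members of v
  have hpred : ∀ s ∈ v, (!(v.any (fun t => pyStrictSubset s t))) = !(altHasSuperset u s) := by
    intro s hs
    congr 1
    rw [hperm.any_eq]
    apply hboolext
    simp only [List.any_eq_true, altHasSuperset]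
    constructor
    · rintro ⟨t, ht, hst⟩
      exact ⟨t, ht, (pvAltStrictIff s t).mpr
        ((pvStrictIff s t (hvN s hs) (huN t ht)).mp hst)⟩
    · rintro ⟨t, ht, hst⟩
      exact ⟨t, ht, (pvStrictIff s t (hvN s hs) (huN t ht)).mpr
        ((pvAltStrictIff s t).mp hst)⟩
  -- A's accumulation = filter over v
  have hfoldA :
      v.foldl (fun acc frame =>
          if acc.any (fun larger => pyStrictSubset frame larger) then acc else acc ++ [frame]) []
        = v.filter (fun s => !(v.any (fun t => pyStrictSubset s t))) :=
    pvFoldMaximal pyStrictSubset v hsorted hlt htrans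
  -- A's final dedup is the identity
  have hW : (v.filter (fun s => !(v.any (fun t => pyStrictSubset s t)))).Pairwise
      (fun a b => PySem.Set.equal b a = false) := hvP.filter _
  show pyFrozenDedup _ = _
  simp only [hdedup, ← hv, hfoldA]
  rw [pyFrozenDedup, pvDedupNoop _ [] (by simp) hW, List.nil_append]
  -- B: sort after filter = filter after sort
  show _ = PySem.List.sorted (u.filter (fun s => !(altHasSuperset u s))) (fun s => PySem.Set.len s) true
  rw [← pvFilterSorted (fun s => PySem.Set.len s) (fun s => !(altHasSuperset u s)) u, ← hv]
  exact List.filter_congr hpred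

-- ===== VERDICT (by name: the statement is the Claim_ definition above) =====
theorem find_maximal_sets_new_spec : Claim_equal_find_maximal_sets_new := by
  intro frames _
  exact pvMain frames
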